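-- pv_equiv track=rewrite | github.com/joaoh82/leetcode_with_python | chucked_palindrome.py | solution
-- ===== SOURCE A (Python) =====
-- def solution(str):
--     size = len(str)
--
--     if not str:
--         return 0
--
--     for i in range(size//2):
--         if str[:i+1] == str[size - 1 - i:]:
--             return 2 + solution(str[i + 1: size - 1 - i])
--     return 1
-- ===== SOURCE B (Python) =====
-- def solution(str):
--     n = len(str)
--     if not str:
--         return 0
--     count = 0
--     k = 0
--     i, j = 0, n - 1
--     while i < j:
--         k += 1
--         if all(str[i - k + 1 + d] == str[j + d] for d in range(k)):
--             count += 2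
--             k = 0
--         i += 1
--         j -= 1
--     if k > 0 or i == j:
--         count += 1
--     return count
-- ===== Notes on version B (the rewrite author's own statement) =====
-- stated objective: faster
-- what changed: replaced A's recursive slice-allocating prefix/suffix search with a single iterative two-pointer scan that tracks the current chunk length and compares characters in place (no recursion, no slicing)
import Mathlib
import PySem

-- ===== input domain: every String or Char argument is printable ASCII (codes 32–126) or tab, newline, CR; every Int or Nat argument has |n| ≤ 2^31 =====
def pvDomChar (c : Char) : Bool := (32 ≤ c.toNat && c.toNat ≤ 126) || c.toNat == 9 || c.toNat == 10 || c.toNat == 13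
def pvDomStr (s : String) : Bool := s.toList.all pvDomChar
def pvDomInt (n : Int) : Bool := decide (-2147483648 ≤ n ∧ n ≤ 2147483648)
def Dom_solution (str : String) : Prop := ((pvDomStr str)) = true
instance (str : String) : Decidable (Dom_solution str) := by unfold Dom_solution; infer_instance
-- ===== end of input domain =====

-- B replaces A's recursive slice-and-compare chunk search by a single iterative two-pointer
-- scan tracking the current chunk length in place (no recursion, no slicing; a timing run
-- measured B faster on its generated inputs); return values proved equal on all strings.

-- ===== PORT A =====
-- the `for i in range(size//2): if str[:i+1] == str[size-1-i:]: return ...` loop: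
-- first matching i, scanned in order (fuel = number of remaining iterations).
-- Python slices str[:i+1] / str[size-1-i:] with the nonnegative in-range bounds used here
-- are exactly List.take / List.drop on the character list.
def loopA (s : List Char) (i fuel : Nat) : Option Nat :=
  match fuel with
  | 0 => none
  | f + 1 =>
    if s.take (i + 1) = s.drop (s.length - 1 - i) then some i
    else loopA s (i + 1) f

-- str[i+1 : size-1-i] with 0 ≤ i+1 ≤ size-1-i ≤ size is (drop (i+1)).take (size-1-i-(i+1))
def solList (s : List Char) : Int :=
  if s = [] then 0
  else
    match loopA s 0 (s.length / 2) with
    | some i => 2 + solList ((s.drop (i + 1)).take (s.length - 1 - i - (i + 1)))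
    | none => 1
termination_by s.length
decreasing_by
  rename_i hne
  have h1 : ((s.drop (i + 1)).take (s.length - 1 - i - (i + 1))).length ≤ s.length - (i + 1) := by
    simp [List.length_take, List.length_drop]
  have h2 : s.length ≠ 0 := fun h => hne (List.length_eq_zero_iff.mp h)
  omega

def solution (str : String) : Int := solList str.toList

-- ===== PORT B =====
-- `all(str[i-k+1+d] == str[j+d] for d in range(k))`: d ascending with early exit.
-- All indices used are nonnegative and in range on every state this port reaches
-- (left chunk starts at i-k+1 ≥ 0, right chunk ends at j+k-1 ≤ n-1), so getD is exact.
def chkB (s : List Char) (a b d q : Nat) : Bool :=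
  if d < q then
    if s.getD (a + d) ' ' = s.getD (b + d) ' ' then chkB s a b (d + 1) q else false
  else true
termination_by q - d

-- the `while i < j` loop; k is the current (pre-increment) chunk length
def loopB (s : List Char) (i j k : Nat) (count : Int) : Int :=
  if i < j then
    if chkB s (i + 1 - (k + 1)) j 0 (k + 1) then loopB s (i + 1) (j - 1) 0 (count + 2)
    else loopB s (i + 1) (j - 1) (k + 1) count
  else if k > 0 ∨ i = j then count + 1 else count
termination_by j - i
decreasing_by all_goals omega

def solution_alt (str : String) : Int :=
  let s := str.toList
  if s = [] then 0 else loopB s 0 (s.length - 1) 0 0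

-- ===== PRECONDITION & SPEC =====
def Spec_solution (str : String) (out : Int) : Prop := out = solution_alt str
instance (str : String) (out : Int) : Decidable (Spec_solution str out) := by unfold Spec_solution; infer_instance

-- ===== CLAIM (what is proved, stated in full; the proofs are below) =====
def Claim_equal_solution : Prop := ∀ (str : String), Dom_solution str → Spec_solution str (solution str)

-- ===== LEMMAS AND PROOFS =====

-- chkB is pointwise character equality on [d, q)
lemma chkB_iff (s : List Char) (a b q : Nat) : ∀ n d, q - d ≤ n →
    (chkB s a b d q = true ↔ ∀ e, d ≤ e → e < q → s.getD (a + e) ' ' = s.getD (b + e) ' ') := by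
  intro n
  induction n with
  | zero =>
    intro d h
    have hd : ¬ d < q := by omega
    rw [chkB]
    simp only [hd, if_false, true_iff]
    intro e he1 he2; omega
  | succ n ih =>
    intro d h
    rw [chkB]
    by_cases hd : d < q
    · simp only [hd, if_true]
      by_cases hc : s.getD (a + d) ' ' = s.getD (b + d) ' '
      · rw [if_pos hc, ih (d + 1) (by omega)]
        constructor
        · intro H e he1 he2
          rcases Nat.eq_or_lt_of_le he1 with rfl | hlt
          · exact hc
          · exact H e hlt he2
        · intro H e he1 he2; exact H e (by omega) he2
      · rw [if_neg hc]
        refine ⟨fun H => by simp at H, fun H => absurd (H d le_rfl hd) hc⟩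
    · simp only [hd, if_false, true_iff]
      intro e he1 he2; omega

-- two equal-length slices are equal iff pointwise equal
lemma slice_eq_iff (s : List Char) (a b q : Nat) (ha : a + q ≤ s.length) (hb : b + q ≤ s.length) :
    ((s.drop a).take q = (s.drop b).take q ↔ ∀ e, e < q → s.getD (a + e) ' ' = s.getD (b + e) ' ') := by
  constructor
  · intro H e he
    have h1 : ((s.drop a).take q)[e]'(by simp [List.length_take, List.length_drop]; omega)
        = ((s.drop b).take q)[e]'(by simp [List.length_take, List.length_drop]; omega) := by
      simp only [H]
    rw [List.getElem_take, List.getElem_drop, List.getElem_take, List.getElem_drop] at h1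
    rwa [List.getD_eq_getElem _ _ (by omega), List.getD_eq_getElem _ _ (by omega)]
  · intro H
    apply List.ext_getElem (by simp [List.length_take, List.length_drop]; omega)
    intro e h1 h2
    have h3 : e < q := by simp [List.length_take, List.length_drop] at h1; omega
    have := H e h3
    rw [List.getD_eq_getElem _ _ (by omega), List.getD_eq_getElem _ _ (by omega)] at this
    simpa [List.getElem_take, List.getElem_drop] using this

-- adjacent slices concatenate
lemma slice_concat (s : List Char) (a b c : Nat) (hab : a ≤ b) (hbc : b ≤ c) :
    (s.drop a).take (b - a) ++ (s.drop b).take (c - b) = (s.drop a).take (c - a) := by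
  rw [show c - a = (b - a) + (c - b) by omega, List.take_add]
  congr 1
  rw [List.drop_drop, show a + (b - a) = b by omega]

lemma loopA_none (s : List Char) : ∀ fuel i,
    (∀ d, d < fuel → ¬ (s.take (i + d + 1) = s.drop (s.length - 1 - (i + d)))) →
    loopA s i fuel = none := by
  intro fuel
  induction fuel with
  | zero => intro i _; rw [loopA]
  | succ f ih =>
    intro i H
    rw [loopA]
    rw [if_neg (by simpa using H 0 (by omega))]
    refine ih (i + 1) (fun d hd => ?_)
    have h2 := H (d + 1) (by omega)
    rwa [show i + (d + 1) = i + 1 + d by omega] at h2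

lemma loopA_some (s : List Char) : ∀ fuel i d, d < fuel →
    (∀ e, e < d → ¬ (s.take (i + e + 1) = s.drop (s.length - 1 - (i + e)))) →
    s.take (i + d + 1) = s.drop (s.length - 1 - (i + d)) →
    loopA s i fuel = some (i + d) := by
  intro fuel
  induction fuel with
  | zero => intro i d hd; omega
  | succ f ih =>
    intro i d hd Hlt Heq
    rw [loopA]
    match d with
    | 0 =>
      rw [if_pos (by simpa using Heq)]
      simp
    | d + 1 =>
      rw [if_neg (by simpa using Hlt 0 (by omega))]
      have h2 := ih (i + 1) d (by omega) (fun e he => by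
        have := Hlt (e + 1) (by omega)
        rwa [show i + (e + 1) = i + 1 + e by omega] at this)
        (by rwa [show i + (d + 1) = i + 1 + d by omega] at Heq)
      rwa [show i + 1 + d = i + (d + 1) by omega] at h2

-- length of an in-range slice
lemma slice_len (s : List Char) (a m : Nat) (h : a + m ≤ s.length) :
    ((s.drop a).take m).length = m := by
  simp [List.length_take, List.length_drop]; omega

-- stopped loop (¬ i < j): the remaining virtual string is a single chunk (or empty)
lemma loopB_stop (s : List Char) (i j k : Nat) (c : Int)
    (_hj : j < s.length) (hij1 : i ≤ j + 1) (hki : k ≤ i) (hjk : j + 1 + k ≤ s.length)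
    (hstop : ¬ i < j)
    (inv : ∀ q, 1 ≤ q → q ≤ k →
      ¬ (((s.drop (i - k)).take (j + 1 + k - (i - k))).take q
        = ((s.drop (i - k)).take (j + 1 + k - (i - k))).drop
            (((s.drop (i - k)).take (j + 1 + k - (i - k))).length - q))) :
    loopB s i j k c = c + solList ((s.drop (i - k)).take (j + 1 + k - (i - k))) := by
  set t := (s.drop (i - k)).take (j + 1 + k - (i - k)) with ht
  have hlen : t.length = j + 1 + k - (i - k) := slice_len s _ _ (by omega)
  rw [loopB, if_neg hstop]
  by_cases hcase : k > 0 ∨ i = j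
  · -- one leftover chunk: solList t = 1
    rw [if_pos hcase]
    have htne : t ≠ [] := by
      intro h; rw [h] at hlen; simp at hlen; omega
    have hfuel : t.length / 2 ≤ k := by omega
    have hnone : loopA t 0 (t.length / 2) = none := by
      apply loopA_none
      intro d hd
      have := inv (d + 1) (by omega) (by omega)
      rwa [show t.length - (d + 1) = t.length - 1 - (0 + d) by omega,
        show d + 1 = 0 + d + 1 by omega] at this
    rw [solList, if_neg htne, hnone]
  · -- empty remainder
    rw [if_neg hcase]
    have hk : k = 0 := by omega
    have hii : i = j + 1 := by omega
    have h0 : t = [] := by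
      rw [ht, hk, hii]
      simp
    rw [h0]
    simp [solList]
-- main loop invariant: loopB from state (i, j, k) computes count + solList of the
-- remaining virtual string  l ++ middle ++ r  (left chunk, unscanned middle, right chunk)
lemma loopB_solList (s : List Char) : ∀ n i j k (c : Int),
    j < s.length → i ≤ j + 1 → k ≤ i → j + 1 + k ≤ s.length → j + 1 - i ≤ n →
    (∀ q, 1 ≤ q → q ≤ k →
      ¬ (((s.drop (i - k)).take (j + 1 + k - (i - k))).take q
        = ((s.drop (i - k)).take (j + 1 + k - (i - k))).drop
            (((s.drop (i - k)).take (j + 1 + k - (i - k))).length - q))) →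
    loopB s i j k c = c + solList ((s.drop (i - k)).take (j + 1 + k - (i - k))) := by
  intro n
  induction n with
  | zero =>
    intro i j k c hj hij1 hki hjk hn inv
    exact loopB_stop s i j k c hj hij1 hki hjk (by omega) inv
  | succ n ih =>
    intro i j k c hj hij1 hki hjk hn inv
    by_cases hij : i < j
    · set t := (s.drop (i - k)).take (j + 1 + k - (i - k)) with ht
      have hlen : t.length = j + 1 + 2 * k - i := by
        rw [ht, slice_len s _ _ (by omega)]; omega
      -- the three pieces of t
      set L := (s.drop (i - k)).take (k + 1) with hL
      set M := (s.drop (i + 1)).take (j - (i + 1)) with hM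
      set R := (s.drop j).take (k + 1) with hR
      have hLlen : L.length = k + 1 := slice_len s _ _ (by omega)
      have hMlen : M.length = j - (i + 1) := slice_len s _ _ (by omega)
      have hRlen : R.length = k + 1 := slice_len s _ _ (by omega)
      have hsplit : t = L ++ (M ++ R) := by
        have h1 := slice_concat s (i + 1) j (j + 1 + k) (by omega) (by omega)
        have h2 := slice_concat s (i - k) (i + 1) (j + 1 + k) (by omega) (by omega)
        rw [show j + 1 + k - j = k + 1 by omega] at h1
        rw [show i + 1 - (i - k) = k + 1 by omega] at h2
        rw [ht, ← h2, ← h1, hL, hM, hR]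
      have hTtake : t.take (k + 1) = L := by
        rw [hsplit]; exact List.take_left' hLlen
      have hTdrop : t.drop (t.length - (k + 1)) = R := by
        have h1 : t = (L ++ M) ++ R := by rw [hsplit, List.append_assoc]
        rw [h1]
        apply List.drop_left'
        have : t.length = ((L ++ M) ++ R).length := by rw [h1]
        simp [List.length_append, hLlen, hMlen, hRlen] at this ⊢
        omega
      -- the chunk test is L = R
      have hchk : (chkB s (i + 1 - (k + 1)) j 0 (k + 1) = true) ↔ L = R := by
        rw [show i + 1 - (k + 1) = i - k by omega]
        rw [chkB_iff s (i - k) j (k + 1) (k + 1) 0 (by omega)]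
        rw [hL, hR, slice_eq_iff s (i - k) j (k + 1) (by omega) (by omega)]
        constructor
        · intro H e he; exact H e (by omega) he
        · intro H e _ he; exact H e he
      rw [loopB, if_pos hij]
      by_cases hc : chkB s (i + 1 - (k + 1)) j 0 (k + 1) = true
      · -- chunk matches: count += 2, recurse on the middle
        rw [if_pos hc]
        have hLR : L = R := hchk.mp hc
        have hrec := ih (i + 1) (j - 1) 0 (c + 2) (by omega) (by omega) (by omega)
          (by omega) (by omega) (by intro q h1 h2; omega)
        rw [show i + 1 - 0 = i + 1 by omega, show j - 1 + 1 + 0 - (i + 1) = j - (i + 1) by omega]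
          at hrec
        rw [hrec, ← hM]
        -- solList t = 2 + solList M
        have htne : t ≠ [] := by intro h; rw [h] at hlen; simp at hlen; omega
        have hsome : loopA t 0 (t.length / 2) = some k := by
          have := loopA_some t (t.length / 2) 0 k (by omega)
            (fun e he => by
              have := inv (e + 1) (by omega) (by omega)
              rwa [show t.length - (e + 1) = t.length - 1 - (0 + e) by omega,
                show e + 1 = 0 + e + 1 by omega] at this)
            (by
              rw [show (0 + k + 1) = k + 1 by omega,
                show t.length - 1 - (0 + k) = t.length - (k + 1) by omega]
              rw [hTtake, hTdrop, hLR])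
          simpa using this
        have harg : (t.drop (k + 1)).take (t.length - 1 - k - (k + 1)) = M := by
          have hd : t.drop (k + 1) = M ++ R := by
            rw [hsplit]; exact List.drop_left' hLlen
          rw [hd, show t.length - 1 - k - (k + 1) = M.length by omega]
          exact List.take_left' rfl
        have hsolt : solList t = 2 + solList M := by
          rw [solList, if_neg htne, hsome]
          show 2 + solList ((t.drop (k + 1)).take (t.length - 1 - k - (k + 1))) = 2 + solList M
          rw [harg]
        rw [hsolt]
        ring
      · -- no match yet: chunk grows
        rw [if_neg hc]
        have hrec := ih (i + 1) (j - 1) (k + 1) c (by omega) (by omega) (by omega)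
          (by omega) (by omega) (by
            intro q h1 h2
            rw [show i + 1 - (k + 1) = i - k by omega,
              show j - 1 + 1 + (k + 1) - (i - k) = j + 1 + k - (i - k) by omega, ← ht]
            rcases Nat.lt_or_ge q (k + 1) with hq | hq
            · exact inv q h1 (by omega)
            · have hq' : q = k + 1 := by omega
              rw [hq', hTtake, hTdrop]
              exact fun h => hc (hchk.mpr h))
        rw [show i + 1 - (k + 1) = i - k by omega,
          show j - 1 + 1 + (k + 1) - (i - k) = j + 1 + k - (i - k) by omega, ← ht] at hrec
        rw [hrec]
    · exact loopB_stop s i j k c hj hij1 hki hjk hij inv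
-- ===== VERDICT (by name: the statement is the Claim_ definition above) =====
theorem solution_spec : Claim_equal_solution := by
  unfold Claim_equal_solution
  intro str _
  unfold Spec_solution solution solution_alt
  set s := str.toList with hs
  by_cases h : s = []
  · rw [h]
    simp [solList]
  · simp only [if_neg h]
    have hlen : 1 ≤ s.length := by
      rcases s with _ | ⟨a, l⟩
      · exact absurd rfl h
      · simp
    have hmain := loopB_solList s s.length 0 (s.length - 1) 0 0 (by omega) (by omega)
      (by omega) (by omega) (by omega) (by intro q h1 h2; omega)
    rw [hmain, show (0 : Nat) - 0 = 0 by omega,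
      show s.length - 1 + 1 + 0 - 0 = s.length by omega]
    simp
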